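-- pv_equiv track=rewrite | github.com/Aram-37/panacea_repo | unified/imm_purified_implementation.py | extract_dialogue_segments
-- ===== SOURCE A (Python) =====
-- from typing import Dict, Any, List
--
-- def extract_dialogue_segments(content: str) -> List[str]:
--     """Extract dialogue segments from content"""
--     # Simple segmentation - real implementation would be more sophisticated
--     segments = []
--     lines = content.split('\n')
--     current_segment = []
--
--     for line in lines:
--         if line.strip():
--             current_segment.append(line)
--             if len(current_segment) >= 10:  # Segment every 10 lines
--                 segments.append('\n'.join(current_segment))
--                 current_segment = []
--
--     if current_segment:
--         segments.append('\n'.join(current_segment))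
--
--     return segments
-- ===== SOURCE B (Python) =====
-- def extract_dialogue_segments(content: str):
--     """Two separate passes: filter non-empty lines, then chunk into windows of 10."""
--     filtered = [line for line in content.split('\n') if line.strip()]
--     segments = []
--     while filtered:
--         segments.append('\n'.join(filtered[:10]))
--         filtered = filtered[10:]
--     return segments
-- ===== Notes on version B (the rewrite author's own statement) =====
-- stated objective: simpler
-- what changed: Replaces the interleaved append/flush accumulator loop by two independent passes: a filter of non-empty lines followed by fixed-size chunking of that list.
import Mathlib
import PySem

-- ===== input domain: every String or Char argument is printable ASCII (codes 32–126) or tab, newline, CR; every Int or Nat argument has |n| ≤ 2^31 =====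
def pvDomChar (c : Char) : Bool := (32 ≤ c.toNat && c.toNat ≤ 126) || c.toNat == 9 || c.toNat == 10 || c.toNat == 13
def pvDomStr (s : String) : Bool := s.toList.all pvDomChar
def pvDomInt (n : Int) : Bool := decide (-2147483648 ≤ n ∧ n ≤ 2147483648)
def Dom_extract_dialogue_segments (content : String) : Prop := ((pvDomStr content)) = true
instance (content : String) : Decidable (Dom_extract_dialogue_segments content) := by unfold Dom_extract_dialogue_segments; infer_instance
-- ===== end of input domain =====

-- B groups the non-empty lines in two separate passes (filter, then chunk by 10) instead of A's
-- interleaved append/flush accumulator; same return value, no speed claim.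

-- ===== PORT A =====
-- loop body of A's `for line in lines`: state = (segments, current_segment)
def pvStepA (st : List String × List String) (line : String) : List String × List String :=
  if PySem.Str.strip line != "" then
    let cur := st.2 ++ [line]
    if 10 ≤ cur.length then (st.1 ++ [PySem.Str.join "\n" cur], []) else (st.1, cur)
  else st

def extract_dialogue_segments (content : String) : List String :=
  let lines := ((PySem.Str.split? content "\n").getD [])
  let st := lines.foldl pvStepA ([], [])
  if st.2 ≠ [] then st.1 ++ [PySem.Str.join "\n" st.2] else st.1

-- ===== PORT B =====
-- B's while loop: peel the first 10 lines off `filtered` until it is empty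
def pvChunksB : List String → List String
  | [] => []
  | x :: rest => PySem.Str.join "\n" ((x :: rest).take 10) :: pvChunksB ((x :: rest).drop 10)
  termination_by xs => xs.length
  decreasing_by simp

def extract_dialogue_segments_alt (content : String) : List String :=
  let filtered := (((PySem.Str.split? content "\n").getD [])).filter (fun l => PySem.Str.strip l != "")
  pvChunksB filtered

-- ===== PRECONDITION & SPEC =====
def Spec_extract_dialogue_segments (content : String) (out : List String) : Prop := out = extract_dialogue_segments_alt content
instance (content : String) (out : List String) : Decidable (Spec_extract_dialogue_segments content out) := by unfold Spec_extract_dialogue_segments; infer_instance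

-- ===== CLAIM (what is proved, stated in full; the proofs are below) =====
def Claim_equal_extract_dialogue_segments : Prop := ∀ (content : String), Dom_extract_dialogue_segments content → Spec_extract_dialogue_segments content (extract_dialogue_segments content)

-- ===== LEMMAS AND PROOFS =====

theorem pvChunksB_nil : pvChunksB [] = [] := by simp [pvChunksB]

theorem pvChunksB_ne_nil (xs : List String) (h : xs ≠ []) :
    pvChunksB xs = PySem.Str.join "\n" (xs.take 10) :: pvChunksB (xs.drop 10) := by
  cases xs with
  | nil => exact absurd rfl h
  | cons x rest => simp [pvChunksB]

theorem pvLoopInv (lines segs cur : List String) (h : cur.length < 10) :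
    (let st := lines.foldl pvStepA (segs, cur);
     if st.2 ≠ [] then st.1 ++ [PySem.Str.join "\n" st.2] else st.1)
    = segs ++ pvChunksB (cur ++ lines.filter (fun l => PySem.Str.strip l != "")) := by
  induction lines generalizing segs cur with
  | nil =>
    simp only [List.foldl_nil, List.filter_nil, List.append_nil]
    by_cases hc : cur = []
    · subst hc; simp [pvChunksB]
    · rw [pvChunksB_ne_nil cur hc, if_pos hc,
        List.take_of_length_le (Nat.le_of_lt h), List.drop_eq_nil_of_le (Nat.le_of_lt h)]
      simp [pvChunksB_nil]
  | cons l rest ih =>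
    simp only [List.foldl_cons, List.filter_cons]
    by_cases hl : PySem.Str.strip l != ""
    · simp only [pvStepA, hl, if_pos]
      by_cases hlen : 10 ≤ (cur ++ [l]).length
      · simp only [if_pos hlen]
        have hlen10 : (cur ++ [l]).length = 10 := by
          simp at hlen ⊢; omega
        have hX : cur ++ l :: rest.filter (fun l => PySem.Str.strip l != "")
            = (cur ++ [l]) ++ rest.filter (fun l => PySem.Str.strip l != "") := by simp
        rw [hX, pvChunksB_ne_nil ((cur ++ [l]) ++ rest.filter (fun l => PySem.Str.strip l != "")) (by simp),
          List.take_left' hlen10, List.drop_left' hlen10,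
          ih (segs ++ [PySem.Str.join "\n" (cur ++ [l])]) [] (by norm_num)]
        simp
      · simp only [if_neg hlen]
        rw [ih segs (cur ++ [l]) (by simp at hlen ⊢; omega)]
        simp
    · simp only [pvStepA, hl, if_neg, Bool.false_eq_true, not_false_iff]
      exact ih segs cur h

-- ===== VERDICT (by name: the statement is the Claim_ definition above) =====
theorem extract_dialogue_segments_spec : Claim_equal_extract_dialogue_segments := by
  intro content _
  show _ = _
  unfold extract_dialogue_segments extract_dialogue_segments_alt
  rw [pvLoopInv (((PySem.Str.split? content "\n").getD [])) [] [] (by norm_num)]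
  simp
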